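-- pv_equiv track=rewrite | github.com/C-B-U/algorithm_challenge | 시즌 12/상/kimryungyo/0210_6_kimryungyo.py | unit_and_count
-- ===== SOURCE A (Python) =====
-- def unit_and_count(depth):
--     counts = {}
--     counts[0] = [0, 0, 0, 0, 0, 0, 0, 0, 0, 0]
--     counts[1] = [0, 1, 0, 0, 0, 0, 0, 0, 0, 0]
--
--     count = counts[1]
--     for depth in range(0, depth):
--
--         add_one = 10 ** depth - 1
--         add_default = (depth * 10 ** (depth - 1)) if depth != 0 else 0
--
--         for num in range(1, 10):
--             distance = [add_default] * 10
--             distance[num] += add_one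
--
--             if 1 <= num + 1 <= 9:
--                 distance[num + 1] += 1
--             else:
--                 distance[0] += 1
--
--             if num == 9:
--                 distance[1] += 1
--
--             count = [count[n] + distance[n] for n in range(10)]
--             counts[(num + 1) * 10 ** depth] = count.copy()
--
--     return counts
-- ===== SOURCE B (Python) =====
-- def _count_digit(c, m, d, p):
--     # occurrences of digit c in the decimal writings of 1..m*10**d (1 <= m <= 9),
--     # by the standard closed form; p must equal 10**d.
--     base = d * m * p // 10
--     if c == 0:
--         return base + d - (p - 1) // 9
--     return base + (p if m > c else (1 if m == c else 0))
--
--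
-- def unit_and_count(depth):
--     counts = {0: [0] * 10, 1: [0, 1, 0, 0, 0, 0, 0, 0, 0, 0]}
--     p = 1  # 10**d, maintained incrementally
--     for d in range(0, depth):
--         for m in range(2, 11):
--             mm, dd, pp = (1, d + 1, p * 10) if m == 10 else (m, d, p)
--             counts[m * p] = [_count_digit(c, mm, dd, pp) for c in range(10)]
--         p *= 10
--     return counts
-- ===== Notes on version B (the rewrite author's own statement) =====
-- stated objective: alternative
-- what changed: B drops A's running accumulator entirely: each stored entry is computed independently by the closed-form positional digit-counting formula for the numbers up to that entry's key (full cycles per lower position, a leading-digit comparison, and a leading-zero correction), instead of prefix-summing per-step increment vectors.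
import Mathlib
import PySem

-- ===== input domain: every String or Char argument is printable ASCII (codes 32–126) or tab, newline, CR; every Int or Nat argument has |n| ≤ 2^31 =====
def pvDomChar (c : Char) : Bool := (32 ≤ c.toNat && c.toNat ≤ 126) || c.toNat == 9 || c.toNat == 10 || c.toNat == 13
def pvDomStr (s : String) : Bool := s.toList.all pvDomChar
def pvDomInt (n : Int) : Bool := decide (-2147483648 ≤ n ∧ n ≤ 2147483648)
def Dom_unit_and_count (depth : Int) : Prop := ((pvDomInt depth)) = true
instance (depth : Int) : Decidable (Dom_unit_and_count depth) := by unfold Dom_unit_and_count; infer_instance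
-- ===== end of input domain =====

-- B replaces A's running accumulation of per-step increment vectors by an independent
-- closed-form digit count for each stored entry (objective: alternative).

-- ===== PORT A =====
-- distance = [add_default]*10; distance[num] += add_one; …  (indices are always 0..9,
-- so the total pySetD/pyGetD forms are exact here)
def uacDistA (d num : Int) : List Int :=
  let add_one : Int := (10 : Int) ^ d.toNat - 1
  let add_default : Int := if d ≠ 0 then d * (10 : Int) ^ (d - 1).toNat else 0
  let distance := List.replicate 10 add_default
  let distance := PySem.List.pySetD distance num (PySem.List.pyGetD distance num 0 + add_one)
  let distance :=
    if 1 ≤ num + 1 ∧ num + 1 ≤ 9 then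
      PySem.List.pySetD distance (num + 1) (PySem.List.pyGetD distance (num + 1) 0 + 1)
    else
      PySem.List.pySetD distance 0 (PySem.List.pyGetD distance 0 0 + 1)
  if num = 9 then PySem.List.pySetD distance 1 (PySem.List.pyGetD distance 1 0 + 1) else distance

def unit_and_count (depth : Int) : List (Int × List Int) :=
  let counts : PySem.Dict Int (List Int) :=
    (PySem.Dict.empty.insert 0 [0, 0, 0, 0, 0, 0, 0, 0, 0, 0]).insert 1
      [0, 1, 0, 0, 0, 0, 0, 0, 0, 0]
  let st :=
    (PySem.List.pyRange 0 depth 1).foldl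
      (fun st d =>
        (PySem.List.pyRange 1 10 1).foldl
          (fun (st : PySem.Dict Int (List Int) × List Int) num =>
            let distance := uacDistA d num
            let count := (PySem.List.pyRange 0 10 1).map
              (fun n => PySem.List.pyGetD st.2 n 0 + PySem.List.pyGetD distance n 0)
            (st.1.insert ((num + 1) * (10 : Int) ^ d.toNat) count, count))
          st)
      (counts, counts.getD 1 [])
  st.1.items

-- ===== PORT B =====
-- closed-form count of digit c in 1..m*10^d (1 ≤ m ≤ 9); p is the caller's 10^d,
-- and 'd * m * p // 10' is Source B's integer-exact d*m*10^(d-1) that is 0 at d = 0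
def uacCountDigit (c m d p : Int) : Int :=
  let base : Int := PySem.Int.floordiv (d * m * p) 10
  if c = 0 then
    base + d - PySem.Int.floordiv (p - 1) 9
  else
    base + (if c < m then p else if m = c then 1 else 0)

def unit_and_count_alt (depth : Int) : List (Int × List Int) :=
  let counts : PySem.Dict Int (List Int) :=
    (PySem.Dict.empty.insert 0 (List.replicate 10 (0 : Int))).insert 1
      [0, 1, 0, 0, 0, 0, 0, 0, 0, 0]
  let st :=
    (PySem.List.pyRange 0 depth 1).foldl
      (fun (st : PySem.Dict Int (List Int) × Int) d =>
        ((PySem.List.pyRange 2 11 1).foldl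
          (fun (cs : PySem.Dict Int (List Int)) m =>
            let mdp : Int × Int × Int := if m = 10 then (1, d + 1, st.2 * 10) else (m, d, st.2)
            cs.insert (m * st.2)
              ((PySem.List.pyRange 0 10 1).map
                (fun c => uacCountDigit c mdp.1 mdp.2.1 mdp.2.2)))
          st.1, st.2 * 10))
      (counts, 1)
  st.1.items

-- ===== PRECONDITION & SPEC =====
def Spec_unit_and_count (depth : Int) (out : List (Int × List Int)) : Prop := out = unit_and_count_alt depth
instance (depth : Int) (out : List (Int × List Int)) : Decidable (Spec_unit_and_count depth out) := by unfold Spec_unit_and_count; infer_instance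

-- ===== CLAIM (what is proved, stated in full; the proofs are below) =====
def Claim_equal_unit_and_count : Prop := ∀ (depth : Int), Dom_unit_and_count depth → Spec_unit_and_count depth (unit_and_count depth)

-- ===== LEMMAS AND PROOFS =====

-- proof-only abbreviations for the two loop bodies and the closed-form vector
def uacVec (m d : Int) : List Int :=
  (PySem.List.pyRange 0 10 1).map (fun c => uacCountDigit c m d ((10 : Int) ^ d.toNat))

def uacStepA (d : Int) (st : PySem.Dict Int (List Int) × List Int) (num : Int) :
    PySem.Dict Int (List Int) × List Int :=
  let distance := uacDistA d num
  let count := (PySem.List.pyRange 0 10 1).map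
    (fun n => PySem.List.pyGetD st.2 n 0 + PySem.List.pyGetD distance n 0)
  (st.1.insert ((num + 1) * (10 : Int) ^ d.toNat) count, count)

def uacStepB (d p : Int) (cs : PySem.Dict Int (List Int)) (m : Int) :
    PySem.Dict Int (List Int) :=
  let mdp : Int × Int × Int := if m = 10 then (1, d + 1, p * 10) else (m, d, p)
  cs.insert (m * p)
    ((PySem.List.pyRange 0 10 1).map (fun c => uacCountDigit c mdp.1 mdp.2.1 mdp.2.2))

-- A's distance list rewritten as a positional formula
def uacDelta (d num : Int) : List Int :=
  let add_one : Int := (10 : Int) ^ d.toNat - 1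
  let base : Int := if d ≠ 0 then d * (10 : Int) ^ (d - 1).toNat else 0
  (PySem.List.pyRange 0 10 1).map (fun n =>
    base + (if n = num then add_one else 0)
         + (if n = PySem.Int.mod (num + 1) 10 then 1 else 0)
         + (if num = 9 ∧ n = 1 then 1 else 0))

theorem uacDist_eq (d num : Int) (h1 : 1 ≤ num) (h2 : num < 10) :
    uacDistA d num = uacDelta d num := by
  interval_cases num <;>
    simp [uacDistA, uacDelta, PySem.Int.mod, PySem.List.pySetD, PySem.List.pySet?,
      PySem.List.pyGetD, PySem.List.pyIdx?, PySem.List.pyGet?, PySem.List.pyRange,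
      List.replicate, List.set, List.range_succ]

theorem uac_fdiv9 (Q : Int) :
    PySem.Int.floordiv (Q * 10 - 1) 9 = PySem.Int.floordiv (Q - 1) 9 + Q := by
  rw [show Q * 10 - 1 = (Q - 1) + Q * 9 by ring,
    PySem.Int.floordiv_eq_ediv_of_pos (by norm_num),
    PySem.Int.floordiv_eq_ediv_of_pos (by norm_num),
    Int.add_mul_ediv_right _ _ (by norm_num : (9 : Int) ≠ 0)]

-- closed form of uacCountDigit with the exact divisions carried out (0 < d)
theorem uacCD_pos (c m d : Int) (hd : 0 < d) :
    uacCountDigit c m d ((10 : Int) ^ d.toNat)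
      = if c = 0 then
          d * m * (10 : Int) ^ (d - 1).toNat + d
            - PySem.Int.floordiv ((10 : Int) ^ d.toNat - 1) 9
        else
          d * m * (10 : Int) ^ (d - 1).toNat
            + (if c < m then (10 : Int) ^ d.toNat else if m = c then 1 else 0) := by
  unfold uacCountDigit
  dsimp only
  rw [show (10 : Int) ^ d.toNat = 10 ^ (d - 1).toNat * 10 from by
    rw [show d.toNat = (d - 1).toNat + 1 by omega, pow_succ]]
  rw [show d * m * ((10 : Int) ^ (d - 1).toNat * 10) = d * m * (10 : Int) ^ (d - 1).toNat * 10 from by ring,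
    PySem.Int.floordiv_eq_ediv_of_pos (by norm_num : (0:Int) < 10),
    Int.mul_ediv_cancel _ (by norm_num : (10:Int) ≠ 0)]

theorem uacR_succ (d : Int) (hd : 0 ≤ d) :
    PySem.Int.floordiv ((10 : Int) ^ (d + 1).toNat - 1) 9
      = PySem.Int.floordiv ((10 : Int) ^ d.toNat - 1) 9 + (10 : Int) ^ d.toNat := by
  rw [show (d + 1).toNat = d.toNat + 1 by omega, pow_succ]
  exact uac_fdiv9 _

-- the heart: one entry of A's distance vector moves the closed form one boundary on
theorem uacEntry (d num c : Int) (hd : 0 ≤ d) (h1 : 1 ≤ num) (h9 : num ≤ 9)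
    (hc0 : 0 ≤ c) (hc9 : c < 10) :
    uacCountDigit c num d ((10 : Int) ^ d.toNat)
      + ((if d ≠ 0 then d * (10 : Int) ^ (d - 1).toNat else 0)
         + (if c = num then (10 : Int) ^ d.toNat - 1 else 0)
         + (if c = PySem.Int.mod (num + 1) 10 then 1 else 0)
         + (if num = 9 ∧ c = 1 then 1 else 0))
      = uacCountDigit c (if num = 9 then 1 else num + 1) (if num = 9 then d + 1 else d)
          ((10 : Int) ^ (if num = 9 then d + 1 else d).toNat) := by
  rcases eq_or_lt_of_le hd with hz | hpos
  · subst hz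
    interval_cases num <;> interval_cases c <;> decide
  · have hne : d ≠ 0 := by omega
    have hP : (10 : Int) ^ d.toNat = 10 ^ (d - 1).toNat * 10 := by
      rw [show d.toNat = (d - 1).toNat + 1 by omega, pow_succ]
    rw [if_pos hne]
    by_cases h9' : num = 9
    · subst h9'
      rw [if_pos rfl, if_pos rfl,
        show PySem.Int.mod ((9 : Int) + 1) 10 = 0 from by decide,
        uacCD_pos c 9 d hpos, uacCD_pos c 1 (d + 1) (by omega),
        show (d + 1 - 1 : Int) = d from by ring, uacR_succ d hd,
        show (10 : Int) ^ (d + 1).toNat = 10 ^ d.toNat * 10 from by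
          rw [show (d + 1).toNat = d.toNat + 1 by omega, pow_succ],
        hP]
      split_ifs <;> first | ring1 | (exfalso; omega)
    · rw [if_neg h9', if_neg h9',
        if_neg (show ¬(num = 9 ∧ c = 1) from fun h => h9' h.1),
        show PySem.Int.mod (num + 1) 10 = num + 1 from by
          rw [PySem.Int.mod_eq_emod_of_pos (by norm_num)]
          exact Int.emod_eq_of_lt (by omega) (by omega),
        uacCD_pos c num d hpos, uacCD_pos c (num + 1) d hpos, hP]
      split_ifs <;> subst_vars <;> first | ring1 | (exfalso; omega)

theorem uacStepVec (d num : Int) (hd : 0 ≤ d) (h1 : 1 ≤ num) (h9 : num ≤ 9) :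
    (PySem.List.pyRange 0 10 1).map
        (fun n => PySem.List.pyGetD (uacVec num d) n 0 + PySem.List.pyGetD (uacDistA d num) n 0)
      = uacVec (if num = 9 then 1 else num + 1) (if num = 9 then d + 1 else d) := by
  rw [uacDist_eq d num h1 (by omega)]
  unfold uacVec uacDelta
  dsimp only
  refine List.map_congr_left (fun n hn => ?_)
  rw [PySem.List.mem_pyRange_one] at hn
  rw [PySem.List.pyGetD_map_pyRange_of_nonneg _ _ _ _ hn.1 hn.2,
    PySem.List.pyGetD_map_pyRange_of_nonneg _ _ _ _ hn.1 hn.2]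
  exact uacEntry d num n hd h1 h9 hn.1 hn.2

theorem uacLevel (d p : Int) (hd : 0 ≤ d) (hp : p = (10 : Int) ^ d.toNat)
    (cs : PySem.Dict Int (List Int)) :
    (PySem.List.pyRange 1 10 1).foldl (uacStepA d) (cs, uacVec 1 d)
      = ((PySem.List.pyRange 2 11 1).foldl (uacStepB d p) cs, uacVec 1 (d + 1)) := by
  subst hp
  have hA : PySem.List.pyRange 1 10 1 = [1, 2, 3, 4, 5, 6, 7, 8, 9] := by decide
  have hB : PySem.List.pyRange 2 11 1 = [2, 3, 4, 5, 6, 7, 8, 9, 10] := by decide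
  have s1 := uacStepVec d 1 hd (by norm_num) (by norm_num)
  have s2 := uacStepVec d 2 hd (by norm_num) (by norm_num)
  have s3 := uacStepVec d 3 hd (by norm_num) (by norm_num)
  have s4 := uacStepVec d 4 hd (by norm_num) (by norm_num)
  have s5 := uacStepVec d 5 hd (by norm_num) (by norm_num)
  have s6 := uacStepVec d 6 hd (by norm_num) (by norm_num)
  have s7 := uacStepVec d 7 hd (by norm_num) (by norm_num)
  have s8 := uacStepVec d 8 hd (by norm_num) (by norm_num)
  have s9 := uacStepVec d 9 hd (by norm_num) (by norm_num)
  norm_num at s1 s2 s3 s4 s5 s6 s7 s8 s9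
  rw [hA, hB]
  simp only [List.foldl, uacStepA, uacStepB]
  rw [s1, s2, s3, s4, s5, s6, s7, s8, s9,
    show (10 : Int) ^ d.toNat * 10 = 10 ^ (d + 1).toNat from by
      rw [show (d + 1).toNat = d.toNat + 1 by omega, pow_succ]]
  norm_num
  rfl

def uacInit : PySem.Dict Int (List Int) :=
  (PySem.Dict.empty.insert 0 [0, 0, 0, 0, 0, 0, 0, 0, 0, 0]).insert 1
    [0, 1, 0, 0, 0, 0, 0, 0, 0, 0]

theorem uacOuter (n : Nat) (cs : PySem.Dict Int (List Int)) :
    (PySem.List.pyRange 0 (n : Int) 1).foldl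
        (fun st d => (PySem.List.pyRange 1 10 1).foldl (uacStepA d) st) (cs, uacVec 1 0)
      = (((PySem.List.pyRange 0 (n : Int) 1).foldl
            (fun st d => ((PySem.List.pyRange 2 11 1).foldl (uacStepB d st.2) st.1, st.2 * 10))
            (cs, 1)).1,
        uacVec 1 (n : Int))
    ∧ ((PySem.List.pyRange 0 (n : Int) 1).foldl
          (fun st d => ((PySem.List.pyRange 2 11 1).foldl (uacStepB d st.2) st.1, st.2 * 10))
          (cs, 1)).2 = (10 : Int) ^ n := by
  induction n with
  | zero => simp [PySem.List.pyRange_one_eq_nil]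
  | succ k ih =>
    obtain ⟨ih1, ih2⟩ := ih
    have hsplit : PySem.List.pyRange 0 ((k : Int) + 1) 1
        = PySem.List.pyRange 0 (k : Int) 1 ++ [(k : Int)] :=
      PySem.List.pyRange_one_succ_right (by positivity)
    have hp2 : ((PySem.List.pyRange 0 (k : Int) 1).foldl
          (fun st d => ((PySem.List.pyRange 2 11 1).foldl (uacStepB d st.2) st.1, st.2 * 10))
          (cs, 1)).2 = (10 : Int) ^ ((k : Int)).toNat := by
      rw [ih2, Int.toNat_natCast]
    constructor
    · push_cast
      rw [hsplit, List.foldl_append, List.foldl_append, ih1]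
      simp only [List.foldl]
      rw [uacLevel (k : Int) _ (by positivity) hp2 _]
    · push_cast
      rw [hsplit, List.foldl_append]
      simp only [List.foldl]
      rw [ih2, pow_succ]

theorem uacRange_toNat (depth : Int) :
    PySem.List.pyRange 0 depth 1 = PySem.List.pyRange 0 (depth.toNat : Int) 1 := by
  rcases (by omega : depth ≤ 0 ∨ 0 < depth) with h | h
  · rw [PySem.List.pyRange_one_eq_nil h,
      PySem.List.pyRange_one_eq_nil (by simp [Int.toNat_of_nonpos h])]
  · rw [Int.toNat_of_nonneg h.le]

theorem unit_and_count_eq (depth : Int) :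
    unit_and_count depth
      = ((PySem.List.pyRange 0 depth 1).foldl
          (fun st d => (PySem.List.pyRange 1 10 1).foldl (uacStepA d) st)
          (uacInit, [0, 1, 0, 0, 0, 0, 0, 0, 0, 0])).1.items := rfl

theorem unit_and_count_alt_eq (depth : Int) :
    unit_and_count_alt depth
      = (((PySem.List.pyRange 0 depth 1).foldl
          (fun st d => ((PySem.List.pyRange 2 11 1).foldl (uacStepB d st.2) st.1, st.2 * 10))
          (uacInit, 1)).1).items := by
  rfl

theorem uacSeed : ([0, 1, 0, 0, 0, 0, 0, 0, 0, 0] : List Int) = uacVec 1 0 := by decide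

-- ===== VERDICT (by name: the statement is the Claim_ definition above) =====
theorem unit_and_count_spec : Claim_equal_unit_and_count := by
  intro depth _
  unfold Spec_unit_and_count
  rw [unit_and_count_eq, unit_and_count_alt_eq, uacRange_toNat, uacSeed,
    (uacOuter depth.toNat uacInit).1]
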